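-- pv_equiv track=rewrite | github.com/mpcmarkets/recommendations_generator | services/pdf_service.py | _format_simple_bullets
-- ===== SOURCE A (Python) =====
-- def _format_simple_bullets(text: str) -> str:
--     """Convert simple dash bullets to LaTeX format"""
--     import re
--
--     # Look for lines that start with "- " (bullet points)
--     lines = text.split('\n')
--     formatted_lines = []
--     in_bullet_list = False
--
--     for line in lines:
--         line = line.strip()
--
--         # Check if this line starts with a dash bullet
--         if line.startswith('- '):
--             if not in_bullet_list:
--                 # Start a new bullet list
--                 formatted_lines.append('\\begin{itemize}')
--                 in_bullet_list = True
--             # Convert dash to LaTeX item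
--             bullet_content = line[2:].strip()  # Remove "- "
--             formatted_lines.append(f'\\item {bullet_content}')
--
--         elif line == '':
--             # Empty line - continue
--             if in_bullet_list:
--                 # End bullet list before empty line
--                 formatted_lines.append('\\end{itemize}')
--                 in_bullet_list = False
--             formatted_lines.append('')
--
--         else:
--             # Regular text line
--             if in_bullet_list:
--                 # End bullet list before regular text
--                 formatted_lines.append('\\end{itemize}')
--                 in_bullet_list = False
--             formatted_lines.append(line)
--
--     # Close any open bullet list at the end
--     if in_bullet_list:
--         formatted_lines.append('\\end{itemize}')
--
--     return '\n'.join(formatted_lines)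
-- ===== SOURCE B (Python) =====
-- def _format_simple_bullets(text: str) -> str:
--     """Convert simple dash bullets to LaTeX format (run-grouping pass)."""
--     lines = [ln.strip() for ln in text.split('\n')]
--     out = []
--     i, n = 0, len(lines)
--     while i < n:
--         if lines[i].startswith('- '):
--             j = i
--             while j < n and lines[j].startswith('- '):
--                 j += 1
--             out.append('\\begin{itemize}')
--             out.extend('\\item ' + l[2:].strip() for l in lines[i:j])
--             out.append('\\end{itemize}')
--             i = j
--         else:
--             out.append(lines[i])
--             i += 1
--     return '\n'.join(out)
-- ===== Notes on version B (the rewrite author's own statement) =====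
-- stated objective: alternative
-- what changed: Replaces A's single-pass state machine with an in_bullet_list flag by a two-pass run-grouping scan: strip all lines first, then walk maximal runs of bullet lines (inner takeWhile-style advance) emitting one itemize block per run and other lines verbatim.
import Mathlib
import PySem

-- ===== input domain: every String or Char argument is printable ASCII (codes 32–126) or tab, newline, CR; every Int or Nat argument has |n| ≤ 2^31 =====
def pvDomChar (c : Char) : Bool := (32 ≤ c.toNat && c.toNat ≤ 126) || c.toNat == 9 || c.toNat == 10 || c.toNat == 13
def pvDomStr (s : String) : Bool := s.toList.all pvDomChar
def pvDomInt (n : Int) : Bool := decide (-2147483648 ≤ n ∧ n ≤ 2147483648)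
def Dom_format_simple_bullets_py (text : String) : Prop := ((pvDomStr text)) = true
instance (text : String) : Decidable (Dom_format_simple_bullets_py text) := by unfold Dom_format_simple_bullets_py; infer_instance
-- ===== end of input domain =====

-- B replaces A's running in_bullet_list flag machine by a two-pass run-grouping
-- scan (strip all lines, then emit one itemize block per maximal run of bullet
-- lines); objective: alternative decomposition, same cost. Same return value.
-- Both ports work on List Char (PySem.Chars is exact there) and pack with String.ofList at the end.

-- ===== PORT A =====
-- the loop body of A's for-loop, named for the proofs; state = (formatted_lines, in_bullet_list)
def fsbStep (st : List (List Char) × Bool) (line0 : List Char) : List (List Char) × Bool :=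
  let line := PySem.Chars.strip line0
  if PySem.Chars.startswith line ['-', ' '] then
    let fl := if !st.2 then st.1 ++ ["\\begin{itemize}".toList] else st.1
    let bullet_content := PySem.Chars.strip (PySem.Chars.slice line (some 2) none)
    (fl ++ ["\\item ".toList ++ bullet_content], true)
  else if line = [] then
    let fl := if st.2 then st.1 ++ ["\\end{itemize}".toList] else st.1
    (fl ++ [[]], false)
  else
    let fl := if st.2 then st.1 ++ ["\\end{itemize}".toList] else st.1
    (fl ++ [line], false)

def format_simple_bullets_py (text : String) : String :=
  let lines := PySem.Chars.splitOn text.toList ['\n']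
  let st := lines.foldl fsbStep ([], false)
  let fl := if st.2 then st.1 ++ ["\\end{itemize}".toList] else st.1
  String.ofList (PySem.Chars.join ['\n'] fl)

-- ===== PORT B =====
def fsbIsBullet (x : List Char) : Bool := PySem.Chars.startswith x ['-', ' ']

def fsbItem (x : List Char) : List Char :=
  "\\item ".toList ++ PySem.Chars.strip (PySem.Chars.slice x (some 2) none)

-- run-grouping over the pre-stripped lines (Source B's while loop over maximal runs)
def fsbBlocks : List (List Char) → List (List Char)
  | [] => []
  | l :: rest =>
    if fsbIsBullet l then
      ("\\begin{itemize}".toList ::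
        (l :: rest.takeWhile fsbIsBullet).map fsbItem ++ ["\\end{itemize}".toList]) ++
      fsbBlocks (rest.dropWhile fsbIsBullet)
    else
      l :: fsbBlocks rest
termination_by ls => ls.length
decreasing_by
  · exact Nat.lt_succ_of_le (List.length_dropWhile_le _ _)
  · simp

def format_simple_bullets_py_alt (text : String) : String :=
  let lines := (PySem.Chars.splitOn text.toList ['\n']).map PySem.Chars.strip
  String.ofList (PySem.Chars.join ['\n'] (fsbBlocks lines))

-- ===== PRECONDITION & SPEC =====
def Spec_format_simple_bullets_py (text : String) (out : String) : Prop := out = format_simple_bullets_py_alt text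
instance (text : String) (out : String) : Decidable (Spec_format_simple_bullets_py text out) := by unfold Spec_format_simple_bullets_py; infer_instance

-- ===== CLAIM (what is proved, stated in full; the proofs are below) =====
def Claim_equal_format_simple_bullets_py : Prop := ∀ (text : String), Dom_format_simple_bullets_py text → Spec_format_simple_bullets_py text (format_simple_bullets_py text)

-- ===== LEMMAS AND PROOFS =====

-- A's final close of an open itemize block
def fsbFinish (st : List (List Char) × Bool) : List (List Char) :=
  if st.2 then st.1 ++ ["\\end{itemize}".toList] else st.1

-- main invariant: A's flag-machine fold, started with flag false, emits exactly
-- B's blocks of the stripped lines; started with flag true it first finishes the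
-- current run (items of the leading bullet lines, then \end{itemize}).
theorem fsb_loop (ls : List (List Char)) :
    (∀ fl, fsbFinish (ls.foldl fsbStep (fl, false)) = fl ++ fsbBlocks (ls.map PySem.Chars.strip)) ∧
    (∀ fl, fsbFinish (ls.foldl fsbStep (fl, true)) =
      fl ++ ((ls.map PySem.Chars.strip).takeWhile fsbIsBullet).map fsbItem
         ++ ["\\end{itemize}".toList] ++ fsbBlocks ((ls.map PySem.Chars.strip).dropWhile fsbIsBullet)) := by
  induction ls with
  | nil => constructor <;> intro fl <;> simp [fsbFinish, fsbBlocks]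
  | cons h t ih =>
    obtain ⟨ihF, ihT⟩ := ih
    by_cases hp : PySem.Chars.startswith (PySem.Chars.strip h) ['-', ' '] = true
    · constructor <;> intro fl
      · rw [List.foldl_cons, show fsbStep (fl, false) h =
            (fl ++ ["\\begin{itemize}".toList, fsbItem (PySem.Chars.strip h)], true) by
              simp [fsbStep, fsbItem, hp]]
        rw [ihT]
        rw [List.map_cons, show fsbBlocks (PySem.Chars.strip h :: List.map PySem.Chars.strip t) =
            ("\\begin{itemize}".toList ::
              ((PySem.Chars.strip h :: (List.map PySem.Chars.strip t).takeWhile fsbIsBullet).map fsbItem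
                ++ ["\\end{itemize}".toList]) ++
              fsbBlocks ((List.map PySem.Chars.strip t).dropWhile fsbIsBullet)) by
            rw [fsbBlocks]; simp [fsbIsBullet, hp]]
        simp
      · rw [List.foldl_cons, show fsbStep (fl, true) h =
            (fl ++ [fsbItem (PySem.Chars.strip h)], true) by
              simp [fsbStep, fsbItem, hp]]
        rw [ihT]
        simp [List.map_cons, fsbIsBullet, hp]
    · have hstep : ∀ fl b, fsbStep (fl, b) h =
          ((if b then fl ++ ["\\end{itemize}".toList] else fl) ++ [PySem.Chars.strip h], false) := by
        intro fl b
        simp only [fsbStep]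
        rw [if_neg hp]
        by_cases he : PySem.Chars.strip h = []
        · rw [if_pos he, he]
        · rw [if_neg he]
      have hblk : fsbBlocks (PySem.Chars.strip h :: List.map PySem.Chars.strip t) =
          PySem.Chars.strip h :: fsbBlocks (List.map PySem.Chars.strip t) := by
        rw [fsbBlocks]; simp [fsbIsBullet, hp]
      constructor <;> intro fl
      · rw [List.foldl_cons, hstep]
        simp only [if_neg Bool.false_ne_true]
        rw [ihF, List.map_cons, hblk]
        simp
      · rw [List.foldl_cons, hstep]
        rw [ihF]
        simp [List.map_cons, fsbIsBullet, hp, hblk]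
-- ===== VERDICT (by name: the statement is the Claim_ definition above) =====
theorem format_simple_bullets_py_spec : Claim_equal_format_simple_bullets_py := by
  intro text _
  unfold Spec_format_simple_bullets_py format_simple_bullets_py format_simple_bullets_py_alt
  have := (fsb_loop (PySem.Chars.splitOn text.toList ['\n'])).1 []
  simp only [fsbFinish] at this
  simp only [this, List.nil_append]
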